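-- pv_equiv track=rewrite | github.com/BrianLusina/PythonSnips | pymath/xbonacci/gibonacci/__init__.py | gibonacci
-- ===== SOURCE A (Python) =====
-- def gibonacci(n: int, x: int, y: int) -> int:
--     if n == 0:
--         return x
--
--     g0 = x
--     g1 = y
--     current = g1 - g0
--
--     for _ in range(n - 1):
--         current = g1 - g0
--         g0 = g1
--         g1 = current
--
--     return current
-- ===== SOURCE B (Python) =====
-- def gibonacci(n: int, x: int, y: int) -> int:
--     # O(1): the recurrence a_k = a_{k-1} - a_{k-2} is periodic with period 6.
--     return [x, y, y - x, -x, -y, x - y][n % 6]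
-- ===== Notes on version B (the rewrite author's own statement) =====
-- stated objective: faster
-- what changed: B replaces A's O(n) loop iterating the subtraction recurrence by an O(1) lookup in the period-6 cycle [x, y, y-x, -x, -y, x-y] indexed by n % 6.
-- intended difference: For n = 1 with x != 0, A returns y - x (the loop's pre-seeded 'current', really the second term of the sequence) while B returns y, the first term a_1, which is the intended value. — e.g. on gibonacci(1, 2, 5): A returns 3, B returns 5
-- outside the precondition, e.g. on gibonacci(-3, 2, 5): A returns 3, B returns -2
import Mathlib
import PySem

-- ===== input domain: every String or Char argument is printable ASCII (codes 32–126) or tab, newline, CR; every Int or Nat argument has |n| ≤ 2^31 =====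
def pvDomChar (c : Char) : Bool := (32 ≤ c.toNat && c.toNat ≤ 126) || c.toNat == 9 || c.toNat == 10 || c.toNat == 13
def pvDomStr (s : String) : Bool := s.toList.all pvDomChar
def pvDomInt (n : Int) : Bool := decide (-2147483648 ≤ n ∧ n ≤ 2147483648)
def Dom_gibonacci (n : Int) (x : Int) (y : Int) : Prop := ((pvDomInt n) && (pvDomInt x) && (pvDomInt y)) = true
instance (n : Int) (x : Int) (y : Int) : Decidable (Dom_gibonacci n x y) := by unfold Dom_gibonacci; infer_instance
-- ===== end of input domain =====

-- B replaces A's O(n) iteration of the recurrence a_k = a_{k-1} - a_{k-2} by an O(1)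
-- lookup in the 6-periodic cycle [x, y, y-x, -x, -y, x-y] indexed by n % 6.

-- ===== PORT A =====
def gibonacci (n : Int) (x : Int) (y : Int) : Int :=
  if n = 0 then x
  else
    -- g0 = x; g1 = y; current = g1 - g0; for _ in range(n - 1): …
    let s := (PySem.List.pyRange 0 (n - 1) 1).foldl
      (fun (st : Int × Int × Int) _ =>
        let current := st.2.1 - st.1
        (st.2.1, current, current))
      (x, y, y - x)
    s.2.2

-- ===== PORT B =====
def gibonacci_alt (n : Int) (x : Int) (y : Int) : Int :=
  -- the index n % 6 lies in [0, 6), so the lookup never raises; 0 is an unreachable default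
  (PySem.List.pyGet? [x, y, y - x, -x, -y, x - y] (PySem.Int.mod n 6)).getD 0

-- ===== PRECONDITION & SPEC =====
-- Pre_ restricts to the natural domain of a sequence index, n ≥ 0: for negative n, A's loop
-- body never runs and it returns the pre-seeded value y - x, an artefact of the loop setup.
def Pre_gibonacci (n : Int) (x : Int) (y : Int) : Prop := 0 ≤ n
instance (n : Int) (x : Int) (y : Int) : Decidable (Pre_gibonacci n x y) := by unfold Pre_gibonacci; infer_instance
def pvWitness_gibonacci : Int × Int × Int := (5, 2, 3)

-- On inputs with n = 1 and x ≠ 0, A returns y - x (the loop's pre-seeded 'current', really the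
-- SECOND term of the sequence) while B returns y, the first term a_1, which is the intended value.
def D_gibonacci (n : Int) (x : Int) (y : Int) : Prop := n = 1 ∧ x ≠ 0
instance (n : Int) (x : Int) (y : Int) : Decidable (D_gibonacci n x y) := by unfold D_gibonacci; infer_instance
def Spec_gibonacci (n : Int) (x : Int) (y : Int) (out : Int) : Prop := ¬ D_gibonacci n x y → out = gibonacci_alt n x y
instance (n : Int) (x : Int) (y : Int) (out : Int) : Decidable (Spec_gibonacci n x y out) := by unfold Spec_gibonacci; infer_instance
def pvDiffWitness_gibonacci : Int × Int × Int := (1, 2, 5)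
def pvDiffWitnessOut_gibonacci : Int × Int := (3, 5)

-- ===== CLAIM (what is proved, stated in full; the proofs are below) =====
def Claim_unchanged_gibonacci : Prop := ∀ (n : Int) (x : Int) (y : Int), Dom_gibonacci n x y → Pre_gibonacci n x y → Spec_gibonacci n x y (gibonacci n x y)
def Claim_changed_gibonacci : Prop := Dom_gibonacci (pvDiffWitness_gibonacci.1) (pvDiffWitness_gibonacci.2.1) (pvDiffWitness_gibonacci.2.2) ∧ Pre_gibonacci (pvDiffWitness_gibonacci.1) (pvDiffWitness_gibonacci.2.1) (pvDiffWitness_gibonacci.2.2) ∧ D_gibonacci (pvDiffWitness_gibonacci.1) (pvDiffWitness_gibonacci.2.1) (pvDiffWitness_gibonacci.2.2) ∧ gibonacci (pvDiffWitness_gibonacci.1) (pvDiffWitness_gibonacci.2.1) (pvDiffWitness_gibonacci.2.2) = pvDiffWitnessOut_gibonacci.1 ∧ gibonacci_alt (pvDiffWitness_gibonacci.1) (pvDiffWitness_gibonacci.2.1) (pvDiffWitness_gibonacci.2.2) = pvDiffWitnessOut_gibonacci.2 ∧ pvDiffWitnessOut_gibonacci.1 ≠ pvDiffWitnessOut_g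ibonacci.2
def Claim_exact_gibonacci : Prop := ∀ (n : Int) (x : Int) (y : Int), Dom_gibonacci n x y → Pre_gibonacci n x y → D_gibonacci n x y → gibonacci n x y ≠ gibonacci_alt n x y

-- ===== LEMMAS AND PROOFS =====

-- A's loop body as a step function on the state (g0, g1, current), and its n-fold iterate.
def gStep (st : Int × Int × Int) : Int × Int × Int := (st.2.1, st.2.1 - st.1, st.2.1 - st.1)

def gIter : Nat → (Int × Int × Int) → (Int × Int × Int)
  | 0, s => s
  | k + 1, s => gIter k (gStep s)

lemma foldl_eq_gIter (l : List Int) (s : Int × Int × Int) :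
    l.foldl (fun (st : Int × Int × Int) _ =>
      let current := st.2.1 - st.1
      (st.2.1, current, current)) s = gIter l.length s := by
  induction l generalizing s with
  | nil => rfl
  | cons h t ih => simpa [List.foldl, gIter] using ih (gStep s)

lemma gIter_add (j k : Nat) (s : Int × Int × Int) : gIter (j + k) s = gIter j (gIter k s) := by
  induction k generalizing s with
  | zero => rfl
  | succ k ih =>
      have : j + (k + 1) = (j + k) + 1 := by omega
      rw [this]
      show gIter (j + k) (gStep s) = gIter j (gIter (k + 1) s)
      rw [ih (gStep s)]
      rfl

lemma gIter_six (a b c : Int) : gIter 6 (a, b, c) = (a, b, b) := by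
  show gIter 0 _ = _
  simp [gIter, gStep]

lemma gIter_period (m : Nat) (a b c : Int) :
    gIter (m + 1 + 6) (a, b, c) = gIter (m + 1) (a, b, c) := by
  rw [gIter_add (m + 1) 6, gIter_six]
  rfl

lemma gIter_mod (k : Nat) (a b c : Int) :
    gIter (k + 1) (a, b, c) = gIter (k % 6 + 1) (a, b, c) := by
  induction k using Nat.strong_induction_on with
  | _ k ih =>
    by_cases h : k < 6
    · rw [Nat.mod_eq_of_lt h]
    · have h6 : k = (k - 6) + 6 := by omega
      have : k + 1 = (k - 6) + 1 + 6 := by omega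
      rw [this, gIter_period, ih (k - 6) (by omega)]
      have : (k - 6) % 6 = k % 6 := by omega
      rw [this]

lemma alt_index (n : Int) : PySem.Int.mod n 6 = n % 6 :=
  PySem.Int.mod_eq_emod_of_pos (by norm_num)

theorem gibonacci_spec : Claim_unchanged_gibonacci := by
  intro n x y _ hpre hnd
  unfold Pre_gibonacci at hpre
  rcases eq_or_lt_of_le hpre with h0 | hpos
  · -- n = 0 : both return x
    subst h0
    simp [gibonacci, gibonacci_alt, PySem.Int.mod, PySem.List.pyGet?, PySem.List.pyIdx?]
  · rcases eq_or_lt_of_le (by omega : (1 : Int) ≤ n) with h1 | h2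
    · -- n = 1 : outside D_ means x = 0; both return y
      have hx : x = 0 := by
        by_contra hx
        exact hnd ⟨h1.symm, hx⟩
      subst hx
      rw [← h1]
      simp [gibonacci, gibonacci_alt, PySem.Int.mod, PySem.List.pyGet?, PySem.List.pyIdx?]
    · -- n ≥ 2 : the loop runs (n-1) ≥ 1 times; reduce by the period 6
      obtain ⟨k, hk⟩ : ∃ k : Nat, n = (k : Int) + 2 := ⟨(n - 2).toNat, by omega⟩
      subst hk
      have hlen : (PySem.List.pyRange 0 ((k : Int) + 2 - 1) 1).length = k + 1 := by
        rw [PySem.List.length_pyRange_one]; omega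
      rw [gibonacci, if_neg (by omega), foldl_eq_gIter, hlen, gIter_mod,
          gibonacci_alt, alt_index _]
      have hr : k % 6 = 0 ∨ k % 6 = 1 ∨ k % 6 = 2 ∨ k % 6 = 3 ∨ k % 6 = 4 ∨ k % 6 = 5 := by omega
      have hmod : ∀ r : Nat, k % 6 = r → ((k : Int) + 2) % 6 = ((r : Int) + 2) % 6 := by
        intro r h; omega
      rcases hr with h | h | h | h | h | h <;>
        rw [h, hmod _ h] <;>
        simp [gIter, gStep, PySem.List.pyGet?, PySem.List.pyIdx?] <;> ring

theorem gibonacci_changed : Claim_changed_gibonacci := by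
  unfold Claim_changed_gibonacci; decide

theorem gibonacci_tight : Claim_exact_gibonacci := by
  intro n x y _ _ hd
  obtain ⟨h1, hx⟩ := hd
  subst h1
  have ha : gibonacci 1 x y = y - x := by
    simp [gibonacci]
  have hb : gibonacci_alt 1 x y = y := by
    simp [gibonacci_alt, PySem.Int.mod, PySem.List.pyGet?, PySem.List.pyIdx?]
  rw [ha, hb]
  omega
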